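-- pv_equiv track=rewrite | github.com/moontasirabtahee/CODINGBAT__PYTHON__SOLVE | 6. Logic-2/lucky_sum.py | lucky_sum
-- ===== SOURCE A (Python) =====
-- def lucky_sum(a, b, c):
--     sum = 0
--     newList = [a,b,c]
--     for i in newList:
--         if i != 13:
--             sum += i
--         else:
--             break
--
--     return sum
-- ===== SOURCE B (Python) =====
-- def lucky_sum(a, b, c):
--     if a == 13:
--         return 0
--     if b == 13:
--         return a
--     if c == 13:
--         return a + b
--     return a + b + c
-- ===== Notes on version B (the rewrite author's own statement) =====
-- stated objective: simpler
-- what changed: Replaces the list-building loop with break and mutable accumulator by a plain guard chain of early returns (no list, no loop, no accumulator).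
import Mathlib
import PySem

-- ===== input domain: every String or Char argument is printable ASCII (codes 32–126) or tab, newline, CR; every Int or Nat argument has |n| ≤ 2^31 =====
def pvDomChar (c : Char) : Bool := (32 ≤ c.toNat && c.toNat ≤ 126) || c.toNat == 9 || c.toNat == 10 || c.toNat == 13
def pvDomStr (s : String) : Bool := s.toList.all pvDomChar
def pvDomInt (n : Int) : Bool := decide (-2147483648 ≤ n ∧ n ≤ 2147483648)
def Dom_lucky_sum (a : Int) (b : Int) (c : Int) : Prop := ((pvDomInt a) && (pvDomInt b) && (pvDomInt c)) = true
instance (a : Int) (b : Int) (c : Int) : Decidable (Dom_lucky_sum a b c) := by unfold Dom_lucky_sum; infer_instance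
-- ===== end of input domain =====

-- B replaces A's loop-with-break over [a,b,c] by a guard chain of early returns (simpler decomposition).


-- ===== PORT A =====
-- loop over [a,b,c]: add while i != 13, break at the first 13
def luckyGo : List Int → Int → Int
  | [], s => s
  | i :: rest, s => if i ≠ 13 then luckyGo rest (s + i) else s

def lucky_sum (a : Int) (b : Int) (c : Int) : Int :=
  luckyGo [a, b, c] 0

-- ===== PORT B =====
-- B: guard chain, no list/loop/accumulator
def lucky_sum_alt (a : Int) (b : Int) (c : Int) : Int :=
  if a = 13 then 0
  else if b = 13 then a
  else if c = 13 then a + b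
  else a + b + c

-- ===== PRECONDITION & SPEC =====
def Spec_lucky_sum (a : Int) (b : Int) (c : Int) (out : Int) : Prop := out = lucky_sum_alt a b c
instance (a : Int) (b : Int) (c : Int) (out : Int) : Decidable (Spec_lucky_sum a b c out) := by unfold Spec_lucky_sum; infer_instance

-- ===== CLAIM (what is proved, stated in full; the proofs are below) =====
def Claim_equal_lucky_sum : Prop := ∀ (a : Int) (b : Int) (c : Int), Dom_lucky_sum a b c → Spec_lucky_sum a b c (lucky_sum a b c)

-- ===== LEMMAS AND PROOFS =====

-- ===== VERDICT (by name: the statement is the Claim_ definition above) =====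
theorem lucky_sum_spec : Claim_equal_lucky_sum := by
  intro a b c _
  simp only [Spec_lucky_sum, lucky_sum, lucky_sum_alt, luckyGo]
  split_ifs <;> omega
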